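-- pv_equiv track=rewrite | github.com/Candy-Sama/Python-Mini-Programs | Level 2 Problems.py | summer_69_better
-- ===== SOURCE A (Python) =====
-- def summer_69_better(arr):
--     total = 0
--     add = True
--
--     for every_num in arr:
--         while add: #if my add bool is true [First digit, so the bool is active]
--             if every_num != 6: #if it's not 6 [eg. first digit is 3, so condition fulfilled]
--                 total += every_num #addon [adds on]
--                 break #get out of this while loop. Why? [It will keep adding on 3 over and over, thats why it needs to break]
--             else: #if it ends up being 6, then stop this while loop
--                 add = False
--
--         while not add: #while add is not active, run this loop
--             if every_num != 9: #if the number isn't 9,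
--                 break # get out of this and got to the next number in the array(via the for loop)
--             else:
--                 add = True #if it is 9, the activate the bool,
--                 break #and break out of this number, so it can go to the next number.
--
--     #note: the reason why while add loop is at the start,
--     # is because it has to check to see if there is a 6 first,
--     # to begin the bool cancellation.
--     return total
-- ===== SOURCE B (Python) =====
-- def summer_69_better(arr):
--     total = sum(arr)
--     i = 0
--     n = len(arr)
--     while i < n:
--         if arr[i] == 6:
--             # subtract the whole 6..9 run (inclusive), or to the end if no 9
--             while i < n:
--                 total -= arr[i]
--                 if arr[i] == 9:
--                     i += 1
--                     break
--                 i += 1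
--         else:
--             i += 1
--     return total
-- ===== Notes on version B (the rewrite author's own statement) =====
-- stated objective: alternative
-- what changed: B first sums the whole list, then scans again subtracting each 6..9 run (inclusive, or to the end if no closing 9), instead of A's add-while-flag state machine.
import Mathlib
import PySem

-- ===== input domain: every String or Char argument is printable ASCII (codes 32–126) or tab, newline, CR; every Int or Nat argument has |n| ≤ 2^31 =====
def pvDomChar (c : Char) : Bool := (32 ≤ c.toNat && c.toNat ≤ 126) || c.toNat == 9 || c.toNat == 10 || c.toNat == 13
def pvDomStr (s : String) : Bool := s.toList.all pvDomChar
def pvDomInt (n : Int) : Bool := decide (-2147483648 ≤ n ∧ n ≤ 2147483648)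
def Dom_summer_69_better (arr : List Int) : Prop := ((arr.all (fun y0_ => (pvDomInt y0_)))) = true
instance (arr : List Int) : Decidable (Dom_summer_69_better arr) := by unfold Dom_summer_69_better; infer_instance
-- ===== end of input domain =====

-- B re-derives the result as sum-everything-then-subtract-each-6..9-run instead of A's add-flag state machine; alternative decomposition, same cost.


-- ===== PORT A =====
-- one iteration of A's for-loop body: the two while-loops reduce to this state step
-- (first while: add & num≠6 → add num, break; add & num=6 → add:=False, then second while breaks since 6≠9;
--  second while: ¬add & num=9 → add:=True; ¬add & num≠9 → break)
def pvStepA (s : Int × Bool) (n : Int) : Int × Bool :=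
  if s.2 then
    (if n ≠ 6 then (s.1 + n, true) else (s.1, false))
  else
    (if n = 9 then (s.1, true) else (s.1, false))

def summer_69_better (arr : List Int) : Int :=
  (arr.foldl pvStepA (0, true)).1

-- ===== PORT B =====
-- B's inner while-loop: subtract the run from the 6 on, until (and including) a 9
-- or to the end; returns the remaining list and the updated total
def pvSkipRun : List Int → Int → List Int × Int
  | [], t => ([], t)
  | x :: xs, t => if x = 9 then (xs, t - x) else pvSkipRun xs (t - x)

theorem pvSkipRun_len (xs : List Int) : ∀ t : Int, (pvSkipRun xs t).1.length ≤ xs.length := by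
  induction xs with
  | nil => intro t; simp [pvSkipRun]
  | cons x xs ih =>
    intro t
    rw [pvSkipRun]
    split
    · simp
    · exact le_trans (ih _) (Nat.le_succ _)

-- B's outer while-loop: advance until a 6 is found, then hand the run to pvSkipRun
def pvSubOuter : List Int → Int → Int
  | [], t => t
  | x :: xs, t =>
    if x = 6 then pvSubOuter (pvSkipRun xs (t - x)).1 (pvSkipRun xs (t - x)).2
    else pvSubOuter xs t
termination_by xs _ => xs.length
decreasing_by
  · exact Nat.lt_succ_of_le (pvSkipRun_len xs (t - x))
  · simp

def summer_69_better_alt (arr : List Int) : Int :=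
  pvSubOuter arr arr.sum

-- ===== PRECONDITION & SPEC =====
def Spec_summer_69_better (arr : List Int) (out : Int) : Prop := out = summer_69_better_alt arr
instance (arr : List Int) (out : Int) : Decidable (Spec_summer_69_better arr out) := by unfold Spec_summer_69_better; infer_instance

-- ===== CLAIM (what is proved, stated in full; the proofs are below) =====
def Claim_equal_summer_69_better : Prop := ∀ (arr : List Int), Dom_summer_69_better arr → Spec_summer_69_better arr (summer_69_better arr)

-- ===== LEMMAS AND PROOFS =====
-- invariant: A's fold from (t, add) equals B's subtract-pass started at t + sum of the rest
theorem pv_fold_eq (xs : List Int) : ∀ t : Int,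
    (xs.foldl pvStepA (t, true)).1 = pvSubOuter xs (t + xs.sum)
    ∧ (xs.foldl pvStepA (t, false)).1
        = pvSubOuter (pvSkipRun xs (t + xs.sum)).1 (pvSkipRun xs (t + xs.sum)).2 := by
  induction xs with
  | nil => intro t; simp [pvSubOuter, pvSkipRun]
  | cons x xs ih =>
    intro t
    have hs : (x :: xs).sum = x + xs.sum := List.sum_cons
    refine ⟨?_, ?_⟩
    · by_cases h6 : x = 6
      · subst h6
        have h1 : List.foldl pvStepA (t, true) (6 :: xs) = List.foldl pvStepA (t, false) xs := by
          rw [List.foldl_cons]; simp [pvStepA]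
        have h2 : t + (6 + xs.sum) - 6 = t + xs.sum := by ring
        rw [h1, hs, pvSubOuter, if_pos rfl, h2]
        exact (ih t).2
      · have h1 : List.foldl pvStepA (t, true) (x :: xs) = List.foldl pvStepA (t + x, true) xs := by
          rw [List.foldl_cons]; simp [pvStepA, h6]
        have h2 : t + (x + xs.sum) = (t + x) + xs.sum := by ring
        rw [h1, hs, pvSubOuter, if_neg h6, h2]
        exact (ih (t + x)).1
    · by_cases h9 : x = 9
      · subst h9
        have h1 : List.foldl pvStepA (t, false) (9 :: xs) = List.foldl pvStepA (t, true) xs := by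
          rw [List.foldl_cons]; simp [pvStepA]
        have h2 : t + (9 + xs.sum) - 9 = t + xs.sum := by ring
        rw [h1, hs, pvSkipRun, if_pos rfl, h2]
        exact (ih t).1
      · have h1 : List.foldl pvStepA (t, false) (x :: xs) = List.foldl pvStepA (t, false) xs := by
          rw [List.foldl_cons]; simp [pvStepA, h9]
        have h2 : t + (x + xs.sum) - x = t + xs.sum := by ring
        rw [h1, hs, pvSkipRun, if_neg h9, h2]
        exact (ih t).2

-- ===== VERDICT (by name: the statement is the Claim_ definition above) =====
theorem summer_69_better_spec : Claim_equal_summer_69_better := by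
  intro arr _
  unfold Spec_summer_69_better summer_69_better summer_69_better_alt
  simpa using (pv_fold_eq arr 0).1
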